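-- pv_equiv track=rewrite | github.com/liuwei7923/AIBookKeeping | main.py | find_csv_value
-- ===== SOURCE A (Python) =====
-- def find_csv_value(row: dict[str, str], candidates: list[str]) -> str | None:
--     normalized_row = {key.strip().lower(): value for key, value in row.items() if key}
--     for candidate in candidates:
--         value = normalized_row.get(candidate)
--         if value is not None:
--             stripped = value.strip()
--             return stripped or None
--     return None
-- ===== SOURCE B (Python) =====
-- def find_csv_value(row: dict[str, str], candidates: list[str]) -> str | None:
--     # No index is built: for each candidate, scan the row directly and keep
--     # the LAST pair whose (truthy) key normalizes to the candidate.
--     for candidate in candidates: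
--         found = None
--         matched = False
--         for key, value in row.items():
--             if key and key.strip().lower() == candidate:
--                 found = value
--                 matched = True
--         if matched:
--             stripped = found.strip()
--             return stripped or None
--     return None
-- ===== Notes on version B (the rewrite author's own statement) =====
-- stated objective: alternative
-- what changed: B builds no normalized-key dictionary at all: for each candidate in order it scans row.items() once keeping the last truthy key whose strip().lower() equals the candidate, reproducing dict last-wins overwrite semantics directly.
import Mathlib
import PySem

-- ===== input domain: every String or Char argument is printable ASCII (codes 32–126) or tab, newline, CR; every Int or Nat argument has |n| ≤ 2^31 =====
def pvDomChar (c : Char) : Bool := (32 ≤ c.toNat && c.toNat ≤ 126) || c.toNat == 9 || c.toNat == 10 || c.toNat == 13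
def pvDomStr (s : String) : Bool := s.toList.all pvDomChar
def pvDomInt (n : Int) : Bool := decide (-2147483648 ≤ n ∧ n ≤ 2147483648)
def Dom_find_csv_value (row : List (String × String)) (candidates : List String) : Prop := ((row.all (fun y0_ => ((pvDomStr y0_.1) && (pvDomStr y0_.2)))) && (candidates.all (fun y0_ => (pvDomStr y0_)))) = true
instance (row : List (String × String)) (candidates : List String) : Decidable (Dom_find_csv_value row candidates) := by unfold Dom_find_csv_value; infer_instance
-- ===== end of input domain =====

-- B drops A's normalized-key dictionary: per candidate it scans the row directly,
-- keeping the last truthy key that normalizes to the candidate (objective: alternative).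

-- ===== PORT A =====
-- the dict comprehension {key.strip().lower(): value for key, value in row.items() if key}
def pvNormRow (row : List (String × String)) : PySem.Dict String String :=
  row.foldl (fun d kv =>
    if kv.1 ≠ "" then d.insert (PySem.Str.lower (PySem.Str.strip kv.1)) kv.2 else d)
    PySem.Dict.empty

-- the 'for candidate in candidates' loop with its early return
def pvLoopA (d : PySem.Dict String String) : List String → Option String
  | [] => none
  | c :: cs =>
    match d.get? c with
    | some value =>
        let stripped := PySem.Str.strip value
        if stripped = "" then none else some stripped   -- 'return stripped or None'
    | none => pvLoopA d cs

def find_csv_value (row : List (String × String)) (candidates : List String) : Option String :=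
  pvLoopA (pvNormRow row) candidates

-- ===== PORT B =====
-- inner scan: last (truthy-key, normalized-equal) match, as a fold carrying 'found'
def pvScanB (row : List (String × String)) (c : String) : Option String :=
  row.foldl (fun found kv =>
    if kv.1 ≠ "" ∧ PySem.Str.lower (PySem.Str.strip kv.1) = c then some kv.2 else found)
    none

def find_csv_value_alt (row : List (String × String)) (candidates : List String) : Option String :=
  match candidates with
  | [] => none
  | c :: cs =>
    match pvScanB row c with
    | some found =>
        let stripped := PySem.Str.strip found
        if stripped = "" then none else some stripped
    | none => find_csv_value_alt row cs

-- ===== PRECONDITION & SPEC =====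
def Spec_find_csv_value (row : List (String × String)) (candidates : List String) (out : Option String) : Prop := out = find_csv_value_alt row candidates
instance (row : List (String × String)) (candidates : List String) (out : Option String) : Decidable (Spec_find_csv_value row candidates out) := by unfold Spec_find_csv_value; infer_instance

-- ===== CLAIM (what is proved, stated in full; the proofs are below) =====
def Claim_equal_find_csv_value : Prop := ∀ (row : List (String × String)) (candidates : List String), Dom_find_csv_value row candidates → Spec_find_csv_value row candidates (find_csv_value row candidates)

-- ===== LEMMAS AND PROOFS =====

-- invariant: the dict built so far looks up c exactly as B's last-match scan so far
theorem pvGet_build (c : String) :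
    ∀ (row : List (String × String)) (d : PySem.Dict String String) (acc : Option String),
      d.get? c = acc →
      (row.foldl (fun d kv =>
          if kv.1 ≠ "" then d.insert (PySem.Str.lower (PySem.Str.strip kv.1)) kv.2 else d) d).get? c
      = row.foldl (fun found kv =>
          if kv.1 ≠ "" ∧ PySem.Str.lower (PySem.Str.strip kv.1) = c then some kv.2 else found) acc := by
  intro row
  induction row with
  | nil => intro d acc h; simpa using h
  | cons kv rest ih =>
    intro d acc h
    simp only [List.foldl_cons]
    by_cases hk : kv.1 = ""
    · rw [if_neg (by simp [hk]), if_neg (by simp [hk])]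
      exact ih d acc h
    · rw [if_pos hk]
      by_cases hc : PySem.Str.lower (PySem.Str.strip kv.1) = c
      · rw [if_pos ⟨hk, hc⟩]
        apply ih
        rw [← hc]
        exact PySem.Dict.get?_insert_self d (PySem.Str.lower (PySem.Str.strip kv.1)) kv.2
      · rw [if_neg (fun hp => hc hp.2)]
        apply ih
        rw [PySem.Dict.get?_insert_of_ne d kv.2 (fun hh => hc hh.symm)]
        exact h

theorem pvGet_norm (row : List (String × String)) (c : String) :
    (pvNormRow row).get? c = pvScanB row c := by
  exact pvGet_build c row PySem.Dict.empty none (PySem.Dict.get?_empty c)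

theorem pvLoop_eq (row : List (String × String)) :
    ∀ (candidates : List String),
      pvLoopA (pvNormRow row) candidates = find_csv_value_alt row candidates := by
  intro candidates
  induction candidates with
  | nil => rfl
  | cons c cs ih =>
    simp only [pvLoopA, find_csv_value_alt, pvGet_norm row c]
    cases pvScanB row c with
    | none => exact ih
    | some v => rfl

-- ===== VERDICT (by name: the statement is the Claim_ definition above) =====
theorem find_csv_value_spec : Claim_equal_find_csv_value := by
  intro row candidates _
  unfold Spec_find_csv_value find_csv_value
  exact pvLoop_eq row candidates
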